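-- pv_equiv track=rewrite | github.com/itman85/AlgoPlayGround | Popular/2pointers/Hard Process.py | solution
-- ===== SOURCE A (Python) =====
-- def solution(a, k):
--     l, maxl, maxr = 0, 0, 0
--     nZero = 0
--     for i in range(len(a)):
--         if a[i] == 0:
--             nZero += 1
--         if nZero > k:
--             if a[l] == 0:
--                 nZero -= 1
--             l += 1
--         if maxr - maxl < i - l:
--             maxl, maxr = l, i
--     for i in range(maxl, maxr + 1):
--         a[i] = 1
--     return maxr - maxl + 1, a
-- ===== SOURCE B (Python) =====
-- def solution(a, k):
--     n = len(a)
--     zeros = [i for i, x in enumerate(a) if x == 0]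
--     m = len(zeros)
--     maxl = maxr = 0
--     for j in range(m + 1):
--         idx = j - k - 1
--         left = 0 if idx < 0 else (zeros[idx] + 1 if idx < m else n)
--         right = zeros[j] - 1 if j < m else n - 1
--         if maxr - maxl < right - left:
--             maxl, maxr = left, right
--     for i in range(maxl, maxr + 1):
--         a[i] = 1
--     return maxr - maxl + 1, a
-- ===== Notes on version B (the rewrite author's own statement) =====
-- stated objective: alternative
-- what changed: Replaces the caterpillar two-pointer scan (left pointer, running zero counter, per-step window bookkeeping) by first collecting the zero positions and then evaluating one maximal candidate window per zero-group boundary (m+1 candidates) directly from the zero-index arithmetic.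
import Mathlib
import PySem

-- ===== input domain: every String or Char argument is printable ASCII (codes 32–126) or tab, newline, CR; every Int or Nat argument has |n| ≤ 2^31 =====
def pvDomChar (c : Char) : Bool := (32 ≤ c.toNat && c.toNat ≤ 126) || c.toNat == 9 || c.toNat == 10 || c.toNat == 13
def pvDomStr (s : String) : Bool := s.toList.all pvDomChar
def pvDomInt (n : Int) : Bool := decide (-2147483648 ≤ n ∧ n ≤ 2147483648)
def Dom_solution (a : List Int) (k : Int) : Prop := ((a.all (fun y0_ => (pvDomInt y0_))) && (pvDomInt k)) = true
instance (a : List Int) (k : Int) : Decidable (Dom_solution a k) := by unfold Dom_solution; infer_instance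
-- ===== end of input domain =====

-- B differs from A's return value only through the same final mutation loop; like A, the
-- Python B mutates its argument in place (the equivalence proved here is about the return value).

-- ===== PORT A =====
-- loop body of A's scan (l, maxl, maxr, nZero); a[i]/a[l] are always in range when the loop runs, so pyGetD is exact
def bodyA (a : List Int) (k : Int) (s : Int × Int × Int × Int) (i : Int) : Int × Int × Int × Int :=
  let l := s.1; let maxl := s.2.1; let maxr := s.2.2.1; let nZero := s.2.2.2
  let nZero := if PySem.List.pyGetD a i 0 = 0 then nZero + 1 else nZero
  let (nZero, l) :=
    if nZero > k then
      ((if PySem.List.pyGetD a l 0 = 0 then nZero - 1 else nZero), l + 1)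
    else (nZero, l)
  let (maxl, maxr) := if maxr - maxl < i - l then (l, i) else (maxl, maxr)
  (l, maxl, maxr, nZero)

def solution (a : List Int) (k : Int) : Int × List Int :=
  let st := (PySem.List.pyRange 0 (a.length : Int) 1).foldl (bodyA a k) (0, 0, 0, 0)
  let maxl := st.2.1; let maxr := st.2.2.1
  let a' := (PySem.List.pyRange maxl (maxr + 1) 1).foldl (fun acc i => PySem.List.pySetD acc i 1) a
  (maxr - maxl + 1, a')

-- ===== PORT B =====
-- loop body of B's candidate scan over j = 0..m
def bodyB (n m : Int) (zeros : List Int) (k : Int) (s : Int × Int) (j : Int) : Int × Int :=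
  let idx := j - k - 1
  let left := if idx < 0 then 0 else (if idx < m then PySem.List.pyGetD zeros idx 0 + 1 else n)
  let right := if j < m then PySem.List.pyGetD zeros j 0 - 1 else n - 1
  if s.2 - s.1 < right - left then (left, right) else s

def solution_alt (a : List Int) (k : Int) : Int × List Int :=
  let n : Int := a.length
  let zeros : List Int := ((PySem.List.enumerate a 0).filter (fun p => p.2 == 0)).map (fun p => p.1)
  let m : Int := zeros.length
  let best := (PySem.List.pyRange 0 (m + 1) 1).foldl (bodyB n m zeros k) (0, 0)
  let a' := (PySem.List.pyRange best.1 (best.2 + 1) 1).foldl (fun acc i => PySem.List.pySetD acc i 1) a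
  (best.2 - best.1 + 1, a')

-- ===== PRECONDITION & SPEC =====
-- Pre_ excludes only the empty list, on which Python A raises IndexError in its final write-back loop (as does B).
def Pre_solution (a : List Int) (k : Int) : Prop := a ≠ []
instance (a : List Int) (k : Int) : Decidable (Pre_solution a k) := by unfold Pre_solution; infer_instance
def pvWitness_solution : List Int × Int := ([1, 0, 1], 1)

def Spec_solution (a : List Int) (k : Int) (out : Int × List Int) : Prop := out = solution_alt a k
instance (a : List Int) (k : Int) (out : Int × List Int) : Decidable (Spec_solution a k out) := by unfold Spec_solution; infer_instance

-- ===== CLAIM (what is proved, stated in full; the proofs are below) =====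
def Claim_equal_solution : Prop := ∀ (a : List Int) (k : Int), Dom_solution a k → Pre_solution a k → Spec_solution a k (solution a k)

-- ===== LEMMAS AND PROOFS =====

-- zero-position bookkeeping: pvzc t = number of zeros among the first t elements, pvZN = list of zero positions
def pvP (a : List Int) (i : Nat) : Bool := a.getD i 1 == 0
def pvZN (a : List Int) : List Nat := (List.range a.length).filter (pvP a)
def pvzc (a : List Int) (t : Nat) : Nat := (a.take t).countP (fun x => x == 0)

-- left boundary of the maximal candidate window whose interior holds j zeros budgeted by k
def pvLJ (a : List Int) (k : Int) (j : Nat) : Int :=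
  if (j : Int) < k + 1 then 0 else ((pvZN a).getD (j - 1 - k.toNat) 0 : Int) + 1

def pvStep (s c : Int × Int) : Int × Int := if s.2 - s.1 < c.2 - c.1 then c else s

def pvCand (a : List Int) (k : Int) (j : Nat) : Int × Int :=
  (pvLJ a k j, ((pvZN a).getD j 0 : Int) - 1)

-- incremental best-window state after scanning the first t positions
def pvBst (a : List Int) (k : Int) : Nat → Int × Int
  | 0 => (0, 0)
  | t + 1 => pvStep (pvBst a k t) (pvLJ a k (pvzc a (t + 1)), (t : Int))

-- A's loop state after t iterations
def pvStA (a : List Int) (k : Int) (t : Nat) : Int × Int × Int × Int :=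
  ((List.range t).map (fun i : Nat => (i : Int))).foldl (bodyA a k) (0, 0, 0, 0)

-- ---- basic facts ----

lemma pvzc_succ (a : List Int) (t : Nat) (ht : t < a.length) :
    pvzc a (t + 1) = pvzc a t + (if pvP a t then 1 else 0) := by
  unfold pvzc pvP
  rw [List.take_succ, List.countP_append, List.getElem?_eq_getElem ht]
  rw [List.getD_eq_getElem a 1 ht]
  simp [List.countP_cons]


lemma pvzc_mono (a : List Int) {s t : Nat} (h : s ≤ t) : pvzc a s ≤ pvzc a t := by
  unfold pvzc
  have h1 : a.take s = (a.take t).take s := by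
    rw [List.take_take, Nat.min_eq_left h]
  rw [h1]
  exact (List.take_sublist s (a.take t)).countP_le


lemma pvzc_eq_filter_range (a : List Int) (t : Nat) (ht : t ≤ a.length) :
    pvzc a t = ((List.range t).filter (pvP a)).length := by
  induction t with
  | zero => simp [pvzc]
  | succ t ih =>
    rw [pvzc_succ a t (by omega), List.range_succ, List.filter_append, List.length_append,
      ih (by omega)]
    by_cases h : pvP a t <;> simp [h]


lemma pvZN_pairwise (a : List Int) : (pvZN a).Pairwise (· < ·) := by
  exact List.pairwise_lt_range.filter _


lemma filter_lt_range (n t : Nat) (h : t ≤ n) :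
    (List.range n).filter (fun i => decide (i < t)) = List.range t := by
  induction n with
  | zero =>
    have h0 : t = 0 := by omega
    subst h0
    simp
  | succ n ih =>
    rw [List.range_succ, List.filter_append]
    by_cases ht' : t ≤ n
    · rw [ih ht']
      have : ¬ (n < t) := by omega
      simp [this]
    · have ht2 : t = n + 1 := by omega
      subst ht2
      rw [List.filter_eq_self.mpr]
      · simp [List.range_succ]
      · intro x hx
        have := List.mem_range.mp hx
        simp only [decide_eq_true_eq]
        omega


lemma sorted_filter_lt_length {L : List Nat} (hL : L.Pairwise (· < ·)) (t : Nat)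
    (r : Nat) (hr : r < L.length) :
    (r < (L.filter (fun i => decide (i < t))).length ↔ L[r] < t) := by
  induction L generalizing r with
  | nil => simp at hr
  | cons x L ih =>
    have hx : ∀ y ∈ L, x < y := (List.pairwise_cons.mp hL).1
    have hL' : L.Pairwise (· < ·) := (List.pairwise_cons.mp hL).2
    by_cases hxt : x < t
    · rw [List.filter_cons_of_pos (by simpa using hxt)]
      cases r with
      | zero => simpa using hxt
      | succ r =>
        simp only [List.length_cons, Nat.add_lt_add_iff_right, List.getElem_cons_succ]
        exact ih hL' r (by simpa using hr)
    · have hnil : L.filter (fun i => decide (i < t)) = [] := by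
        rw [List.filter_eq_nil_iff]
        intro y hy
        have := hx y hy
        simp; omega
      rw [List.filter_cons_of_neg (by simpa using hxt), hnil]
      simp only [List.length_nil, Nat.not_lt_zero, false_iff]
      cases r with
      | zero => simpa using hxt
      | succ r =>
        have hr' : r < L.length := by simpa using hr
        simp only [List.getElem_cons_succ]
        have := hx _ (List.getElem_mem hr')
        omega


-- pvzc t counts the elements of pvZN below t
lemma pvzc_eq_ZN_filter (a : List Int) (t : Nat) (ht : t ≤ a.length) :
    pvzc a t = ((pvZN a).filter (fun i => decide (i < t))).length := by
  rw [pvzc_eq_filter_range a t ht]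
  unfold pvZN
  rw [List.filter_filter]
  have h2 : ((List.range a.length).filter (fun i => decide (i < t))).filter (pvP a)
      = (List.range a.length).filter (fun i => decide (i < t) && pvP a i) := by
    rw [List.filter_filter]
    exact List.filter_congr (fun x _ => by simp [Bool.and_comm])
  rw [← h2, filter_lt_range a.length t ht]


lemma pvZN_char (a : List Int) (t : Nat) (ht : t ≤ a.length) (r : Nat) (hr : r < (pvZN a).length) :
    (r < pvzc a t ↔ (pvZN a)[r] < t) := by
  rw [pvzc_eq_ZN_filter a t ht]
  exact sorted_filter_lt_length (pvZN_pairwise a) t r hr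


lemma pvZN_length (a : List Int) : (pvZN a).length = pvzc a a.length := by
  unfold pvZN
  rw [pvzc_eq_filter_range a a.length (le_refl _)]


lemma pvZN_new (a : List Int) (t : Nat) (ht : t < a.length) (h0 : pvP a t) :
    pvzc a t < (pvZN a).length ∧ (pvZN a).getD (pvzc a t) 0 = t := by
  have hmem : t ∈ pvZN a := by
    unfold pvZN
    rw [List.mem_filter]
    exact ⟨List.mem_range.mpr ht, h0⟩
  obtain ⟨r, hr, hrt⟩ := List.getElem_of_mem hmem
  have hchar := pvZN_char a t (le_of_lt ht) r hr
  have h1 : ¬ (r < pvzc a t) := by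
    rw [hchar, hrt]; omega
  have h2 : r ≤ pvzc a t := by
    by_contra hcon
    have hr' : pvzc a t < (pvZN a).length := by omega
    have hlt : (pvZN a)[pvzc a t] < (pvZN a)[r] := by
      have := List.pairwise_iff_getElem.mp (pvZN_pairwise a) (pvzc a t) r hr' hr (by omega)
      exact this
    rw [hrt] at hlt
    have := (pvZN_char a t (le_of_lt ht) (pvzc a t) hr').mpr (by omega)
    omega
  have hreq : r = pvzc a t := by omega
  subst hreq
  exact ⟨hr, by rw [List.getD_eq_getElem _ _ hr, hrt]⟩


-- ---- the candidate left boundary ----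

lemma pvLJ_nonneg (a : List Int) (k : Int) (j : Nat) : 0 ≤ pvLJ a k j := by
  unfold pvLJ
  split
  · omega
  · have := Int.natCast_nonneg ((pvZN a).getD (j - 1 - k.toNat) 0)
    omega


lemma pvLJ_char (a : List Int) (k : Int) (hk : 0 ≤ k) (t : Nat) (ht : t ≤ a.length)
    (j : Nat) (hj : j ≤ t) :
    ((pvzc a t : Int) - pvzc a j ≤ k ↔ pvLJ a k (pvzc a t) ≤ (j : Int)) := by
  unfold pvLJ
  have hkk : (k.toNat : Int) = k := Int.toNat_of_nonneg hk
  by_cases hm : ((pvzc a t : Nat) : Int) < k + 1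
  · rw [if_pos hm]
    have h1 : (0 : Int) ≤ (j : Int) := Int.natCast_nonneg j
    have h2 : (0 : Int) ≤ (pvzc a j : Int) := Int.natCast_nonneg _
    constructor
    · intro _; omega
    · intro _; omega
  · rw [if_neg hm]
    have hmk : k.toNat + 1 ≤ pvzc a t := by omega
    have hr : pvzc a t - 1 - k.toNat < (pvZN a).length := by
      have h3 := pvzc_mono a ht
      have h4 := pvZN_length a
      omega
    rw [List.getD_eq_getElem _ _ hr]
    have hc := pvZN_char a j (hj.trans ht) (pvzc a t - 1 - k.toNat) hr
    constructor
    · intro h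
      have h5 : pvzc a t - 1 - k.toNat < pvzc a j := by omega
      have := hc.mp h5
      omega
    · intro h
      have h6 : (pvZN a)[pvzc a t - 1 - k.toNat] < j := by omega
      have := hc.mpr h6
      omega


lemma pvLJ_le (a : List Int) (k : Int) (hk : 0 ≤ k) (t : Nat) (ht : t ≤ a.length) :
    pvLJ a k (pvzc a t) ≤ (t : Int) := by
  have := (pvLJ_char a k hk t ht t (le_refl t)).mp (by omega)
  omega


lemma pvLJ_mono (a : List Int) (k : Int) (hk : 0 ≤ k) (t : Nat) (ht : t + 1 ≤ a.length) :
    pvLJ a k (pvzc a t) ≤ pvLJ a k (pvzc a (t + 1)) := by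
  by_contra hcon
  push_neg at hcon
  have hnn := pvLJ_nonneg a k (pvzc a (t + 1))
  have hle1 := pvLJ_le a k hk (t + 1) ht
  have hle0 := pvLJ_le a k hk t (by omega)
  set j : Nat := (pvLJ a k (pvzc a (t + 1))).toNat with hj
  have hjc : (j : Int) = pvLJ a k (pvzc a (t + 1)) := Int.toNat_of_nonneg hnn
  have hj1 : j ≤ t + 1 := by omega
  have h1 : (pvzc a (t + 1) : Int) - pvzc a j ≤ k :=
    (pvLJ_char a k hk (t + 1) ht j hj1).mpr (by omega)
  have hz := pvzc_mono a (show t ≤ t + 1 by omega)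
  have hjt : j ≤ t := by omega
  have h2 : pvLJ a k (pvzc a t) ≤ (j : Int) :=
    (pvLJ_char a k hk t (by omega) j hjt).mp (by omega)
  omega


-- ---- A-side ----

lemma pvStA_succ (a : List Int) (k : Int) (t : Nat) :
    pvStA a k (t + 1) = bodyA a k (pvStA a k t) (t : Int) := by
  unfold pvStA
  rw [List.range_succ, List.map_append, List.foldl_append]
  simp


lemma pyGetD_nat (a : List Int) (t : Nat) (ht : t < a.length) :
    PySem.List.pyGetD a (t : Int) 0 = a[t] := by
  rw [PySem.List.pyGetD_natCast, List.getD_eq_getElem _ _ ht]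


lemma bodyA_eval (a : List Int) (k l p1 p2 z i : Int) :
    bodyA a k (l, p1, p2, z) i =
      ((if (if PySem.List.pyGetD a i 0 = 0 then z + 1 else z) > k then l + 1 else l),
       (if p2 - p1 < i - (if (if PySem.List.pyGetD a i 0 = 0 then z + 1 else z) > k then l + 1 else l)
          then ((if (if PySem.List.pyGetD a i 0 = 0 then z + 1 else z) > k then l + 1 else l), i)
          else (p1, p2)).1,
       (if p2 - p1 < i - (if (if PySem.List.pyGetD a i 0 = 0 then z + 1 else z) > k then l + 1 else l)
          then ((if (if PySem.List.pyGetD a i 0 = 0 then z + 1 else z) > k then l + 1 else l), i)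
          else (p1, p2)).2,
       (if (if PySem.List.pyGetD a i 0 = 0 then z + 1 else z) > k
          then (if PySem.List.pyGetD a l 0 = 0
                then (if PySem.List.pyGetD a i 0 = 0 then z + 1 else z) - 1
                else (if PySem.List.pyGetD a i 0 = 0 then z + 1 else z))
          else (if PySem.List.pyGetD a i 0 = 0 then z + 1 else z))) := by
  simp only [bodyA]
  by_cases c1 : (if PySem.List.pyGetD a i 0 = 0 then z + 1 else z) > k <;> simp [c1]

-- the main invariant, k ≥ 0
lemma pvMain (a : List Int) (k : Int) (hk : 0 ≤ k) :
    ∀ t, t ≤ a.length → ∃ l : Nat,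
      pvStA a k t = ((l : Int), (pvBst a k t).1, (pvBst a k t).2,
        (pvzc a t : Int) - (pvzc a l : Int)) ∧
      l ≤ t ∧ ((l : Int) ≤ pvLJ a k (pvzc a t)) ∧
      (pvBst a k t).2 - (pvBst a k t).1 = max 0 ((t : Int) - l - 1) := by
  intro t
  induction t with
  | zero =>
    intro _
    refine ⟨0, ?_, le_refl 0, ?_, ?_⟩
    · simp [pvStA, pvBst]
    · simpa using pvLJ_nonneg a k (pvzc a 0)
    · simp [pvBst]
  | succ t ih =>
    intro ht1
    have ht : t < a.length := ht1
    obtain ⟨l, hst, hlt, hlc, hdiff⟩ := ih (by omega)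
    have hln : l < a.length := by omega
    have hz1 := pvzc_succ a t ht
    have hzl := pvzc_succ a l hln
    have hchar := pvLJ_char a k hk (t + 1) ht1 l (by omega)
    have hmono := pvLJ_mono a k hk t ht1
    have hle := pvLJ_le a k hk (t + 1) ht1
    have hnn := pvLJ_nonneg a k (pvzc a (t + 1))
    rw [pvStA_succ, hst, bodyA_eval]
    rw [pyGetD_nat a t ht, pyGetD_nat a l hln]
    unfold pvP at hz1 hzl
    rw [List.getD_eq_getElem a 1 ht] at hz1
    rw [List.getD_eq_getElem a 1 hln] at hzl
    simp only [beq_iff_eq] at hz1 hzl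
    by_cases h0 : a[t] = (0 : Int)
    · simp only [if_pos h0] at hz1 ⊢
      by_cases hf : (pvzc a t : Int) - (pvzc a l : Int) + 1 > k
      · simp only [if_pos hf]
        have hlj : (l : Int) + 1 ≤ pvLJ a k (pvzc a (t + 1)) := by
          by_contra hcon
          have h5 : pvLJ a k (pvzc a (t + 1)) ≤ (l : Int) := by omega
          have h6 := hchar.mpr h5
          omega
        have hmax : ¬ ((pvBst a k t).2 - (pvBst a k t).1 < (t : Int) - ((l : Int) + 1)) := by omega
        have hnb : ¬ ((pvBst a k t).2 - (pvBst a k t).1 < (t : Int) - pvLJ a k (pvzc a (t + 1))) := by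
          omega
        simp only [if_neg hmax, pvBst, pvStep, if_neg hnb]
        by_cases hal : a[l] = (0 : Int)
        · simp only [if_pos hal] at hzl ⊢
          refine ⟨l + 1, ?_, by omega, by push_cast; omega, by push_cast; omega⟩
          simp only [Prod.mk.injEq, and_true, true_and]
          push_cast
          omega
        · simp only [if_neg hal] at hzl ⊢
          refine ⟨l + 1, ?_, by omega, by push_cast; omega, by push_cast; omega⟩
          simp only [Prod.mk.injEq, and_true, true_and]
          push_cast
          omega
      · simp only [if_neg hf]
        have h6 : pvLJ a k (pvzc a (t + 1)) ≤ (l : Int) := hchar.mp (by omega)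
        have heq : pvLJ a k (pvzc a (t + 1)) = (l : Int) := by omega
        simp only [pvBst, pvStep, heq]
        by_cases hupd : (pvBst a k t).2 - (pvBst a k t).1 < (t : Int) - (l : Int)
        · simp only [if_pos hupd]
          refine ⟨l, ?_, by omega, by omega, by push_cast; omega⟩
          simp only [Prod.mk.injEq, and_true, true_and]
          push_cast
          omega
        · simp only [if_neg hupd]
          refine ⟨l, ?_, by omega, by omega, by push_cast; omega⟩
          simp only [Prod.mk.injEq, and_true, true_and]
          push_cast
          omega
    · simp only [if_neg h0] at hz1 ⊢
      by_cases hf : (pvzc a t : Int) - (pvzc a l : Int) > k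
      · simp only [if_pos hf]
        have hlj : (l : Int) + 1 ≤ pvLJ a k (pvzc a (t + 1)) := by
          by_contra hcon
          have h5 : pvLJ a k (pvzc a (t + 1)) ≤ (l : Int) := by omega
          have h6 := hchar.mpr h5
          omega
        have hmax : ¬ ((pvBst a k t).2 - (pvBst a k t).1 < (t : Int) - ((l : Int) + 1)) := by omega
        have hnb : ¬ ((pvBst a k t).2 - (pvBst a k t).1 < (t : Int) - pvLJ a k (pvzc a (t + 1))) := by
          omega
        simp only [if_neg hmax, pvBst, pvStep, if_neg hnb]
        by_cases hal : a[l] = (0 : Int)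
        · simp only [if_pos hal] at hzl ⊢
          refine ⟨l + 1, ?_, by omega, by push_cast; omega, by push_cast; omega⟩
          simp only [Prod.mk.injEq, and_true, true_and]
          push_cast
          omega
        · simp only [if_neg hal] at hzl ⊢
          refine ⟨l + 1, ?_, by omega, by push_cast; omega, by push_cast; omega⟩
          simp only [Prod.mk.injEq, and_true, true_and]
          push_cast
          omega
      · simp only [if_neg hf]
        have h6 : pvLJ a k (pvzc a (t + 1)) ≤ (l : Int) := hchar.mp (by omega)
        have heq : pvLJ a k (pvzc a (t + 1)) = (l : Int) := by omega
        simp only [pvBst, pvStep, heq]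
        by_cases hupd : (pvBst a k t).2 - (pvBst a k t).1 < (t : Int) - (l : Int)
        · simp only [if_pos hupd]
          refine ⟨l, ?_, by omega, by omega, by push_cast; omega⟩
          simp only [Prod.mk.injEq, and_true, true_and]
          push_cast
          omega
        · simp only [if_neg hupd]
          refine ⟨l, ?_, by omega, by omega, by push_cast; omega⟩
          simp only [Prod.mk.injEq, and_true, true_and]
          push_cast
          omega


-- A's state for k < 0
lemma pvStA_neg (a : List Int) (k : Int) (hk : k < 0) :
    ∀ t, t ≤ a.length → pvStA a k t = ((t : Int), 0, 0, 0) := by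
  intro t
  induction t with
  | zero => intro _; simp [pvStA]
  | succ t ih =>
    intro ht
    rw [pvStA_succ, ih (by omega)]
    simp only [bodyA]
    by_cases h0 : PySem.List.pyGetD a (t : Int) 0 = 0 <;>
      simp only [h0, if_pos, if_neg, if_true, if_false, ite_true, ite_false] <;>
      split_ifs with h1 h2 h3 <;>
      simp_all [Prod.mk.injEq] <;>
      push_cast <;>
      omega


-- ---- B-side ----

lemma pvP_zero (x : Int) (xs : List Int) : pvP (x :: xs) 0 = (x == 0) := by
  simp [pvP]

lemma pvZeros_aux (a : List Int) : ∀ (s : Int),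
    ((PySem.List.enumerate a s).filter (fun p => p.2 == 0)).map (fun p => p.1)
      = ((List.range a.length).filter (pvP a)).map (fun i : Nat => s + (i : Int)) := by
  induction a with
  | nil => intro s; simp [PySem.List.enumerate_nil]
  | cons x xs ih =>
    intro s
    rw [PySem.List.enumerate_cons, List.length_cons, List.range_succ_eq_map,
      List.filter_cons, List.filter_cons]
    have hmap : List.filter (pvP (x :: xs)) (List.map Nat.succ (List.range xs.length))
        = List.map Nat.succ (List.filter (pvP xs) (List.range xs.length)) := by
      rw [List.filter_map]
      congr 1
    rw [hmap]
    by_cases hx : x = (0 : Int)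
    · have hcx : ((s, x).2 == (0 : Int)) = true := by simp [hx]
      have hcx2 : pvP (x :: xs) 0 = true := by rw [pvP_zero]; simp [hx]
      simp only [hcx, hcx2, if_true]
      rw [List.map_cons, List.map_cons, ih (s + 1), List.map_map]
      simp only [List.cons.injEq]
      constructor
      · simp
      · apply List.map_congr_left
        intro i _
        simp only [Function.comp_apply]
        push_cast
        ring
    · have hcx : ((s, x).2 == (0 : Int)) = false := by simp [hx]
      have hcx2 : pvP (x :: xs) 0 = false := by rw [pvP_zero]; simp [hx]
      simp only [hcx, hcx2, if_false, Bool.false_eq_true]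
      rw [ih (s + 1), List.map_map]
      apply List.map_congr_left
      intro i _
      simp only [Function.comp_apply]
      push_cast
      ring

lemma pvZeros_eq (a : List Int) :
    ((PySem.List.enumerate a 0).filter (fun p => p.2 == 0)).map (fun p => p.1)
      = (pvZN a).map (fun i : Nat => (i : Int)) := by
  rw [pvZeros_aux a 0]
  unfold pvZN
  apply List.map_congr_left
  intro i _
  omega


lemma pvCollapse (s : Int × Int) (L R R' : Int) (h : R' ≤ R) :
    pvStep (pvStep s (L, R')) (L, R) = pvStep s (L, R) := by
  rcases s with ⟨s1, s2⟩
  simp only [pvStep]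
  split_ifs <;> simp_all [Prod.mk.injEq] <;> omega


lemma pvJf (a : List Int) (k : Int) (hk : 0 ≤ k) :
    ∀ t, t ≤ a.length →
      List.foldl pvStep (0, 0)
        (((List.range (pvzc a t)).map (pvCand a k)) ++ [(pvLJ a k (pvzc a t), (t : Int) - 1)])
        = pvBst a k t := by
  intro t
  induction t with
  | zero =>
    intro _
    have hz0 : pvzc a 0 = 0 := by simp [pvzc]
    rw [hz0]
    have hLJ : pvLJ a k 0 = 0 := by
      unfold pvLJ
      rw [if_pos (by push_cast; omega)]
    simp only [List.range_zero, List.map_nil, List.nil_append, List.foldl_cons, List.foldl_nil, hLJ]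
    unfold pvStep
    norm_num [pvBst]
  | succ t ih =>
    intro ht1
    have ht : t < a.length := ht1
    have hz1 := pvzc_succ a t ht
    by_cases h0 : pvP a t
    · have hz : pvzc a (t + 1) = pvzc a t + 1 := by rw [hz1, if_pos h0]
      obtain ⟨hlen, hget⟩ := pvZN_new a t ht h0
      have hc : pvCand a k (pvzc a t) = (pvLJ a k (pvzc a t), (t : Int) - 1) := by
        unfold pvCand
        rw [hget]
      rw [show pvBst a k (t + 1) = pvStep (pvBst a k t) (pvLJ a k (pvzc a (t + 1)), (t : Int)) from rfl]
      rw [← ih (by omega)]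
      rw [hz, List.range_succ, List.map_append, List.map_cons, List.map_nil, hc]
      rw [List.foldl_append, List.foldl_append]
      simp only [List.foldl_cons, List.foldl_nil]
      have hcast : ((t + 1 : Nat) : Int) - 1 = (t : Int) := by push_cast; ring
      rw [hcast]
    · have hz : pvzc a (t + 1) = pvzc a t := by rw [hz1, if_neg h0]; ring
      rw [show pvBst a k (t + 1) = pvStep (pvBst a k t) (pvLJ a k (pvzc a (t + 1)), (t : Int)) from rfl]
      rw [← ih (by omega)]
      rw [hz]
      rw [List.foldl_append, List.foldl_append]
      simp only [List.foldl_cons, List.foldl_nil]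
      rw [pvCollapse _ _ _ _ (by omega : ((t : Int) - 1) ≤ (t : Int))]
      have hcast : ((t + 1 : Nat) : Int) - 1 = (t : Int) := by push_cast; ring
      rw [hcast]


-- the list B's loop folds over, k ≥ 0
lemma pvBList (a : List Int) (k : Int) (hk : 0 ≤ k) :
    ((PySem.List.pyRange 0 (((pvZN a).length : Int) + 1) 1).map
        (fun j => (if j - k - 1 < 0 then 0 else
            (if j - k - 1 < ((pvZN a).length : Int) then
              PySem.List.pyGetD ((pvZN a).map (fun i : Nat => (i : Int))) (j - k - 1) 0 + 1
            else (a.length : Int)),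
          if j < ((pvZN a).length : Int) then
            PySem.List.pyGetD ((pvZN a).map (fun i : Nat => (i : Int))) j 0 - 1
          else (a.length : Int) - 1)))
      = ((List.range (pvzc a a.length)).map (pvCand a k))
        ++ [(pvLJ a k (pvzc a a.length), (a.length : Int) - 1)] := by
  have hkk : (k.toNat : Int) = k := Int.toNat_of_nonneg hk
  have hm : pvzc a a.length = (pvZN a).length := (pvZN_length a).symm
  rw [hm]
  rw [show ((((pvZN a).length : Int)) + 1) = (((pvZN a).length + 1 : Nat) : Int) by push_cast; ring]
  rw [PySem.List.pyRange_zero_nat]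
  rw [List.map_map, List.range_succ, List.map_append, List.map_cons, List.map_nil]
  congr 1
  · apply List.map_congr_left
    intro j hj
    have hjm : j < (pvZN a).length := List.mem_range.mp hj
    simp only [Function.comp_apply]
    unfold pvCand
    simp only [Prod.mk.injEq]
    refine ⟨?_, ?_⟩
    · unfold pvLJ
      by_cases hj1 : ((j : Int)) - k - 1 < 0
      · rw [if_pos hj1, if_pos (by omega)]
      · rw [if_neg hj1, if_neg (show ¬ ((j : Int) < k + 1) by omega)]
        rw [if_pos (show (j : Int) - k - 1 < ((pvZN a).length : Int) by omega)]
        rw [PySem.List.pyGetD_eq_getElem _ _ (by omega) (by simp only [List.length_map]; omega)]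
        rw [List.getElem_map]
        have hidx : ((j : Int) - k - 1).toNat = j - 1 - k.toNat := by omega
        simp only [hidx]
        rw [List.getD_eq_getElem _ _ (show j - 1 - k.toNat < (pvZN a).length by omega)]
    · rw [if_pos (show (j : Int) < ((pvZN a).length : Int) by omega)]
      rw [PySem.List.pyGetD_natCast]
      rw [List.getD_eq_getElem _ _ (by simp only [List.length_map]; omega)]
      rw [List.getElem_map]
      rw [List.getD_eq_getElem _ _ hjm]
  · simp only [Function.comp_apply, List.cons.injEq, and_true, Prod.mk.injEq]
    refine ⟨?_, ?_⟩
    · unfold pvLJ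
      by_cases hm1 : (((pvZN a).length : Int)) < k + 1
      · rw [if_pos (by omega), if_pos hm1]
      · rw [if_neg (by omega), if_neg hm1]
        rw [if_pos (show (((pvZN a).length : Int)) - k - 1 < ((pvZN a).length : Int) by omega)]
        rw [PySem.List.pyGetD_eq_getElem _ _ (by omega) (by simp only [List.length_map]; omega)]
        rw [List.getElem_map]
        have hidx : ((((pvZN a).length : Int)) - k - 1).toNat = (pvZN a).length - 1 - k.toNat := by
          omega
        simp only [hidx]
        rw [List.getD_eq_getElem _ _ (show (pvZN a).length - 1 - k.toNat < (pvZN a).length by omega)]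
    · rw [if_neg (show ¬ ((((pvZN a).length : Int)) < ((pvZN a).length : Int)) by omega)]


lemma pvBodyB_eq (n m : Int) (zeros : List Int) (k : Int) (s : Int × Int) (j : Int) :
    bodyB n m zeros k s j = pvStep s
      ((if j - k - 1 < 0 then 0 else
          (if j - k - 1 < m then PySem.List.pyGetD zeros (j - k - 1) 0 + 1 else n)),
        if j < m then PySem.List.pyGetD zeros j 0 - 1 else n - 1) := by
  rfl


lemma pvStep_stay : ∀ (L : List (Int × Int)), (∀ c ∈ L, c.2 - c.1 < 0) →
    List.foldl pvStep (0, 0) L = (0, 0)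
  | [], _ => rfl
  | c :: L, h => by
    have hc := h c (List.mem_cons_self ..)
    have h1 : pvStep (0, 0) c = (0, 0) := by
      unfold pvStep
      rw [if_neg (by push_cast; omega)]
    rw [List.foldl_cons, h1]
    exact pvStep_stay L (fun d hd => h d (List.mem_cons_of_mem _ hd))

-- B's fold stays (0,0) when k < 0
lemma pvBneg (a : List Int) (k : Int) (hk : k < 0) :
    (PySem.List.pyRange 0 (((pvZN a).length : Int) + 1) 1).foldl
      (bodyB (a.length : Int) ((pvZN a).length : Int) ((pvZN a).map (fun i : Nat => (i : Int))) k) (0, 0)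
      = (0, 0) := by
  have hZlt : ∀ r, (hr : r < (pvZN a).length) → (pvZN a)[r] < a.length := by
    intro r hr
    have hmem := List.getElem_mem hr
    unfold pvZN at hmem
    exact List.mem_range.mp (List.mem_filter.mp hmem).1
  have hfun : bodyB (a.length : Int) ((pvZN a).length : Int) ((pvZN a).map (fun i : Nat => (i : Int))) k
      = fun s j => pvStep s
        ((if j - k - 1 < 0 then 0 else
            (if j - k - 1 < ((pvZN a).length : Int) then
              PySem.List.pyGetD ((pvZN a).map (fun i : Nat => (i : Int))) (j - k - 1) 0 + 1
            else (a.length : Int))),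
          if j < ((pvZN a).length : Int) then
            PySem.List.pyGetD ((pvZN a).map (fun i : Nat => (i : Int))) j 0 - 1
          else (a.length : Int) - 1) := by
    funext s j
    exact pvBodyB_eq _ _ _ _ _ _
  rw [hfun, ← List.foldl_map]
  apply pvStep_stay
  intro c hc
  obtain ⟨j, hjmem, rfl⟩ := List.mem_map.mp hc
  obtain ⟨hj0, hjlt1⟩ := (PySem.List.mem_pyRange_one).mp hjmem
  have hidx0 : ¬ (j - k - 1 < 0) := by omega
  rw [if_neg hidx0]
  by_cases hjlt : j < ((pvZN a).length : Int)
  · rw [if_pos hjlt]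
    rw [PySem.List.pyGetD_eq_getElem _ _ hj0 (by simp only [List.length_map]; omega)]
    rw [List.getElem_map]
    have hjN : j.toNat < (pvZN a).length := by omega
    by_cases hi2 : j - k - 1 < ((pvZN a).length : Int)
    · rw [if_pos hi2]
      rw [PySem.List.pyGetD_eq_getElem _ _ (by omega) (by simp only [List.length_map]; omega)]
      rw [List.getElem_map]
      have hiN : (j - k - 1).toNat < (pvZN a).length := by omega
      have hle : j.toNat ≤ (j - k - 1).toNat := by omega
      have hmono : (pvZN a)[j.toNat] ≤ (pvZN a)[(j - k - 1).toNat] := by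
        rcases Nat.eq_or_lt_of_le hle with heq | hlt2
        · exact le_of_eq (by simp only [heq])
        · exact le_of_lt (List.pairwise_iff_getElem.mp (pvZN_pairwise a) _ _ hjN hiN hlt2)
      simp only [Prod.fst, Prod.snd]
      omega
    · rw [if_neg hi2]
      have := hZlt j.toNat hjN
      simp only [Prod.fst, Prod.snd]
      omega
  · rw [if_neg hjlt]
    rw [if_neg (show ¬ (j - k - 1 < ((pvZN a).length : Int)) by omega)]
    simp only [Prod.fst]
    omega


-- final assembly: the two (maxl, maxr) pairs agree
lemma pvPairs (a : List Int) (k : Int) :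
    ((pvStA a k a.length).2.1, (pvStA a k a.length).2.2.1)
      = (PySem.List.pyRange 0 ((((pvZN a).map (fun i : Nat => (i : Int))).length : Int) + 1) 1).foldl
          (bodyB (a.length : Int) (((pvZN a).map (fun i : Nat => (i : Int))).length : Int)
            ((pvZN a).map (fun i : Nat => (i : Int))) k) (0, 0) := by
  by_cases hk : 0 ≤ k
  · obtain ⟨l, hst, -, -, -⟩ := pvMain a k hk a.length (le_refl _)
    rw [hst]
    simp only [List.length_map]
    have hfun : bodyB (a.length : Int) ((pvZN a).length : Int) ((pvZN a).map (fun i : Nat => (i : Int))) k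
        = fun s j => pvStep s
          ((if j - k - 1 < 0 then 0 else
              (if j - k - 1 < ((pvZN a).length : Int) then
                PySem.List.pyGetD ((pvZN a).map (fun i : Nat => (i : Int))) (j - k - 1) 0 + 1
              else (a.length : Int))),
            if j < ((pvZN a).length : Int) then
              PySem.List.pyGetD ((pvZN a).map (fun i : Nat => (i : Int))) j 0 - 1
            else (a.length : Int) - 1) := by
      funext s j
      exact pvBodyB_eq _ _ _ _ _ _
    rw [hfun, ← List.foldl_map]
    rw [pvBList a k hk]
    rw [pvJf a k hk a.length (le_refl _)]
  · have hkneg : k < 0 := by omega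
    rw [pvStA_neg a k hkneg a.length (le_refl _)]
    simp only [List.length_map]
    rw [pvBneg a k hkneg]


-- ===== VERDICT (by name: the statement is the Claim_ definition above) =====
theorem solution_spec : Claim_equal_solution := by
  intro a k _ _
  unfold Spec_solution
  simp only [solution, solution_alt]
  rw [pvZeros_eq a]
  have hA : (PySem.List.pyRange 0 (a.length : Int) 1).foldl (bodyA a k) (0, 0, 0, 0)
      = pvStA a k a.length := by
    unfold pvStA
    rw [PySem.List.pyRange_zero_nat]
  rw [hA]
  have hp := pvPairs a k
  have h1 := congrArg Prod.fst hp
  have h2 := congrArg Prod.snd hp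
  simp only [] at h1 h2
  rw [h1, h2]
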